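-- pv_equiv track=rewrite | github.com/MSSLSolar/SPPE | tests/test_words.py | remove_third
-- ===== SOURCE A (Python) =====
-- def remove_third(words_list, dictionary_list, check='s'):
--     outwords = list()
--     for word in words_list:
--         check_word = word.lower()
--         if check_word[-len(check):] == check and check_word[:-len(check)] in dictionary_list:
--             outwords.append(word)
--     for word in outwords:
--         words_list.remove(word)
--     return words_list
-- ===== SOURCE B (Python) =====
-- def remove_third(words_list, dictionary_list, check='s'):
--     # single keep-pass instead of collect-then-remove; splice keeps A's in-place mutation
--     kept = [word for word in words_list
--             if not (word.lower()[-len(check):] == check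
--                     and word.lower()[:-len(check)] in dictionary_list)]
--     words_list[:] = kept
--     return words_list
-- ===== Notes on version B (the rewrite author's own statement) =====
-- stated objective: simpler
-- what changed: A collects the matching words and then deletes each with repeated list.remove (quadratic two-pass removal); B keeps the non-matching words in one comprehension pass and splices them back in place.
import Mathlib
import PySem

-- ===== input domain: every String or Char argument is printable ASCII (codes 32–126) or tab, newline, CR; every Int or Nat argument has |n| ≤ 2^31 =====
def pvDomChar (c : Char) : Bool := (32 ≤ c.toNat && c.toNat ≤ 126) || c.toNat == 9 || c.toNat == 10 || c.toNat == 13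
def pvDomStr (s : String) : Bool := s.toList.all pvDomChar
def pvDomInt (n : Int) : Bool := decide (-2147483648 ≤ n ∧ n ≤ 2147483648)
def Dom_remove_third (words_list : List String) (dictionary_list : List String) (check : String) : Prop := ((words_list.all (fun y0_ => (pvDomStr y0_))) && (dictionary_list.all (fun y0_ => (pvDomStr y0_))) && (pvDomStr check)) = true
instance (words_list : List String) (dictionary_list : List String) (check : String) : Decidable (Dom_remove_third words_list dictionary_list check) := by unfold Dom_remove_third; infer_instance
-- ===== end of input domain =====

-- B replaces A's collect-matches-then-repeated-list.remove two-pass removal by a single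
-- keep-filter pass (objective: simpler). Both Pythons mutate words_list in place; the
-- equivalence proved here is about the returned list of words.

-- shared condition: word's lowered form ends with `check` and the rest is in the dictionary
-- (the two slicings are exactly Python's check_word[-len(check):] and check_word[:-len(check)])
def pvCond (dictionary_list : List String) (check : String) (word : String) : Bool :=
  let check_word := PySem.Str.lower word
  (PySem.Str.slice check_word (some (-(check.length : Int))) none == check)
    && dictionary_list.contains (PySem.Str.slice check_word none (some (-(check.length : Int))))

-- ===== PORT A =====
-- words_list.remove(word) never raises here (each removed word was collected from the list);
-- the `.getD ws` branch of remove? is therefore never the result on any reachable state.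
def remove_third (words_list : List String) (dictionary_list : List String) (check : String) : List String :=
  let outwords := words_list.foldl
    (fun acc word => if pvCond dictionary_list check word then acc ++ [word] else acc) []
  outwords.foldl (fun ws word => (PySem.List.remove? ws word).getD ws) words_list

-- ===== PORT B =====
def remove_third_alt (words_list : List String) (dictionary_list : List String) (check : String) : List String :=
  words_list.filter (fun word => !(pvCond dictionary_list check word))

-- ===== PRECONDITION & SPEC =====
def Spec_remove_third (words_list : List String) (dictionary_list : List String) (check : String) (out : List String) : Prop := out = remove_third_alt words_list dictionary_list check
instance (words_list : List String) (dictionary_list : List String) (check : String) (out : List String) : Decidable (Spec_remove_third words_list dictionary_list check out) := by unfold Spec_remove_third; infer_instance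

-- ===== CLAIM (what is proved, stated in full; the proofs are below) =====
def Claim_equal_remove_third : Prop := ∀ (words_list : List String) (dictionary_list : List String) (check : String), Dom_remove_third words_list dictionary_list check → Spec_remove_third words_list dictionary_list check (remove_third words_list dictionary_list check)

-- ===== LEMMAS AND PROOFS =====

-- A's first loop (append-if) builds exactly the filter of the list.
theorem pv_outwords_eq_filter (p : String → Bool) (acc ws : List String) :
    ws.foldl (fun acc w => if p w then acc ++ [w] else acc) acc = acc ++ ws.filter p := by
  induction ws generalizing acc with
  | nil => simp
  | cons w ws ih =>
      by_cases h : p w = true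
      · simp [List.foldl, h, ih]
      · simp [List.foldl, h, ih, Bool.of_not_eq_true h]

-- removing (first occurrences of) elements that all satisfy p from w :: ws with ¬ p w
-- leaves w in front.
theorem pv_rem_skips_head (p : String → Bool) (l : List String)
    (hl : ∀ u ∈ l, p u = true) (w : String) (hw : p w = false) (ws : List String) :
    l.foldl (fun ws word => (PySem.List.remove? ws word).getD ws) (w :: ws)
      = w :: l.foldl (fun ws word => (PySem.List.remove? ws word).getD ws) ws := by
  induction l generalizing ws with
  | nil => rfl
  | cons u l ih =>
      have hu : p u = true := hl u (by simp)
      have hne : w ≠ u := by intro h; rw [h, hu] at hw; cases hw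
      have hl' : ∀ x ∈ l, p x = true := fun x hx => hl x (by simp [hx])
      simp only [List.foldl]
      rw [PySem.List.remove?_cons_of_ne ws hne]
      cases hres : PySem.List.remove? ws u with
      | none => simpa [hres] using ih hl' ws
      | some r => simpa [hres] using ih hl' r

-- removing exactly the p-matching words (in order, first occurrence each) from the list
-- itself leaves exactly the non-matching words.
theorem pv_remove_filter (p : String → Bool) (ws : List String) :
    (ws.filter p).foldl (fun ws word => (PySem.List.remove? ws word).getD ws) ws
      = ws.filter (fun w => !(p w)) := by
  induction ws with
  | nil => rfl
  | cons w ws ih =>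
      by_cases h : p w = true
      · simp only [List.filter_cons, h, if_pos, List.foldl,
          PySem.List.remove?_cons_self, Option.getD_some]
        simpa [h] using ih
      · have h' : p w = false := Bool.of_not_eq_true h
        have hl : ∀ u ∈ ws.filter p, p u = true := fun u hu => (List.mem_filter.mp hu).2
        simp only [List.filter_cons, h', if_neg, Bool.false_eq_true, not_false_iff]
        rw [pv_rem_skips_head p (ws.filter p) hl w h' ws, ih]
        simp

-- ===== VERDICT (by name: the statement is the Claim_ definition above) =====
theorem remove_third_spec : Claim_equal_remove_third := by
  intro words_list dictionary_list check _
  show remove_third words_list dictionary_list check = remove_third_alt words_list dictionary_list check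
  unfold remove_third remove_third_alt
  rw [pv_outwords_eq_filter, List.nil_append, pv_remove_filter]
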